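-- pv_equiv track=rewrite | github.com/Orlando020/mcb185_homework | 63kozak.py | pwmextract
-- ===== SOURCE A (Python) =====
-- def pwmextract(relativecoord, seq, tlcoord):
--     ntp = [0,0,0,0]
--     for coord in tlcoord:
--         koza = coord +  relativecoord
--         if seq[koza] == 'a': ntp[0] += 1
--         if seq[koza] == 'c': ntp[1] += 1
--         if seq[koza] == 'g': ntp[2] += 1
--         if seq[koza] == 't': ntp[3] += 1
--     return ntp
-- ===== SOURCE B (Python) =====
-- def pwmextract(relativecoord, seq, tlcoord):
--     bases = [seq[c + relativecoord] for c in tlcoord]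
--     return [bases.count(b) for b in 'acgt']
-- ===== Notes on version B (the rewrite author's own statement) =====
-- stated objective: idiomatic
-- what changed: B first materialises the list of bases at the offset positions with a comprehension and then tallies it with list.count per nucleotide, replacing A's four per-iteration branch-and-increment updates of a positional counter list.
import Mathlib
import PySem

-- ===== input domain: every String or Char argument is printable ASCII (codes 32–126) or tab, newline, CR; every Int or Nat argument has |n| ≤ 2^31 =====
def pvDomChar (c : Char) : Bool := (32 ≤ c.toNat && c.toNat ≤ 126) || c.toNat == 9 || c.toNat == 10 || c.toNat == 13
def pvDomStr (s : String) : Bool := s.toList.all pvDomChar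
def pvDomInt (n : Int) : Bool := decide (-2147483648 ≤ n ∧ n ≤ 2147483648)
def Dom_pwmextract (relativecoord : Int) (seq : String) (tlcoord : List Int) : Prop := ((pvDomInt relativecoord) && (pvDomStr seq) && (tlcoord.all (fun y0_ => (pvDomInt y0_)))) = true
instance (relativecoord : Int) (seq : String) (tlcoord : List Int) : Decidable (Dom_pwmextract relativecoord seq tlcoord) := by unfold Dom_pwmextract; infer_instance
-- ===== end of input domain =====

-- B builds the list of bases at the offset positions and tallies it with count, instead of A's four branch-and-increment updates; objective: idiomatic.

-- ===== PORT A =====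
def pwmextract (relativecoord : Int) (seq : String) (tlcoord : List Int) : List Int :=
  let ntp := tlcoord.foldl (fun (ntp : Int × Int × Int × Int) coord =>
    let koza := coord + relativecoord
    let ch := (PySem.Str.pyGet? seq koza).getD '?'   -- Pre_ guarantees in range; '?' never hit under Pre_
    let ntp := if ch = 'a' then (ntp.1 + 1, ntp.2.1, ntp.2.2.1, ntp.2.2.2) else ntp
    let ntp := if ch = 'c' then (ntp.1, ntp.2.1 + 1, ntp.2.2.1, ntp.2.2.2) else ntp
    let ntp := if ch = 'g' then (ntp.1, ntp.2.1, ntp.2.2.1 + 1, ntp.2.2.2) else ntp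
    let ntp := if ch = 't' then (ntp.1, ntp.2.1, ntp.2.2.1, ntp.2.2.2 + 1) else ntp
    ntp) ((0 : Int), (0 : Int), (0 : Int), (0 : Int))
  [ntp.1, ntp.2.1, ntp.2.2.1, ntp.2.2.2]

-- ===== PORT B =====
def pwmextract_alt (relativecoord : Int) (seq : String) (tlcoord : List Int) : List Int :=
  let bases := tlcoord.map (fun c => (PySem.Str.pyGet? seq (c + relativecoord)).getD '?')
  ['a', 'c', 'g', 't'].map (fun b => (PySem.List.count bases b : Int))

-- ===== PRECONDITION & SPEC =====
-- Pre_ excludes exactly the inputs where Python A raises IndexError (an offset position out of range).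
def Pre_pwmextract (relativecoord : Int) (seq : String) (tlcoord : List Int) : Prop :=
  ∀ c ∈ tlcoord, PySem.Raise.InRange seq.toList.length (c + relativecoord)
instance (relativecoord : Int) (seq : String) (tlcoord : List Int) : Decidable (Pre_pwmextract relativecoord seq tlcoord) := by unfold Pre_pwmextract; infer_instance
def pvWitness_pwmextract : Int × String × List Int := (1, "gaccata", [0, 2, 4, -2])

def Spec_pwmextract (relativecoord : Int) (seq : String) (tlcoord : List Int) (out : List Int) : Prop := out = pwmextract_alt relativecoord seq tlcoord
instance (relativecoord : Int) (seq : String) (tlcoord : List Int) (out : List Int) : Decidable (Spec_pwmextract relativecoord seq tlcoord out) := by unfold Spec_pwmextract; infer_instance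

-- ===== CLAIM (what is proved, stated in full; the proofs are below) =====
def Claim_equal_pwmextract : Prop := ∀ (relativecoord : Int) (seq : String) (tlcoord : List Int), Dom_pwmextract relativecoord seq tlcoord → Pre_pwmextract relativecoord seq tlcoord → Spec_pwmextract relativecoord seq tlcoord (pwmextract relativecoord seq tlcoord)

-- ===== LEMMAS AND PROOFS =====

-- Named form of A's loop body (proof helper).
def pvStepA (relativecoord : Int) (seq : String) (ntp : Int × Int × Int × Int) (coord : Int) :
    Int × Int × Int × Int :=
  let ch := (PySem.Str.pyGet? seq (coord + relativecoord)).getD '?'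
  (ntp.1 + (if ch = 'a' then 1 else 0), ntp.2.1 + (if ch = 'c' then 1 else 0),
   ntp.2.2.1 + (if ch = 'g' then 1 else 0), ntp.2.2.2 + (if ch = 't' then 1 else 0))

-- The four successive conditional updates amount to one additive update, for any character.
theorem pvStep_core (ch : Char) (a c g t : Int) :
    (let ntp := if ch = 'a' then ((a : Int) + 1, c, g, t) else (a, c, g, t)
     let ntp := if ch = 'c' then (ntp.1, ntp.2.1 + 1, ntp.2.2.1, ntp.2.2.2) else ntp
     let ntp := if ch = 'g' then (ntp.1, ntp.2.1, ntp.2.2.1 + 1, ntp.2.2.2) else ntp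
     let ntp := if ch = 't' then (ntp.1, ntp.2.1, ntp.2.2.1, ntp.2.2.2 + 1) else ntp
     ntp)
    = (a + (if ch = 'a' then 1 else 0), c + (if ch = 'c' then 1 else 0),
       g + (if ch = 'g' then 1 else 0), t + (if ch = 't' then 1 else 0)) := by
  by_cases ha : ch = 'a' <;> by_cases hc : ch = 'c' <;>
    by_cases hg : ch = 'g' <;> by_cases ht : ch = 't' <;> simp_all

-- A's loop body equals its named additive form.
theorem pwm_lambda_eq (relativecoord : Int) (seq : String) :
    (fun (ntp : Int × Int × Int × Int) coord =>
      let koza := coord + relativecoord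
      let ch := (PySem.Str.pyGet? seq koza).getD '?'
      let ntp := if ch = 'a' then (ntp.1 + 1, ntp.2.1, ntp.2.2.1, ntp.2.2.2) else ntp
      let ntp := if ch = 'c' then (ntp.1, ntp.2.1 + 1, ntp.2.2.1, ntp.2.2.2) else ntp
      let ntp := if ch = 'g' then (ntp.1, ntp.2.1, ntp.2.2.1 + 1, ntp.2.2.2) else ntp
      let ntp := if ch = 't' then (ntp.1, ntp.2.1, ntp.2.2.1, ntp.2.2.2 + 1) else ntp
      ntp) = pvStepA relativecoord seq := by
  funext ntp coord
  obtain ⟨a, c, g, t⟩ := ntp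
  exact pvStep_core ((PySem.Str.pyGet? seq (coord + relativecoord)).getD '?') a c g t

-- Folding A's step adds, to each component, the count of the matching base.
theorem pwm_fold_count (relativecoord : Int) (seq : String) (l : List Int) (a c g t : Int) :
    l.foldl (pvStepA relativecoord seq) (a, c, g, t)
    = (a + ((l.map (fun x => (PySem.Str.pyGet? seq (x + relativecoord)).getD '?')).count 'a' : Int),
       c + ((l.map (fun x => (PySem.Str.pyGet? seq (x + relativecoord)).getD '?')).count 'c' : Int),
       g + ((l.map (fun x => (PySem.Str.pyGet? seq (x + relativecoord)).getD '?')).count 'g' : Int),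
       t + ((l.map (fun x => (PySem.Str.pyGet? seq (x + relativecoord)).getD '?')).count 't' : Int)) := by
  induction l generalizing a c g t with
  | nil => simp
  | cons hd tl ih =>
    rw [List.foldl_cons,
      show pvStepA relativecoord seq (a, c, g, t) hd
        = (a + (if (PySem.Str.pyGet? seq (hd + relativecoord)).getD '?' = 'a' then 1 else 0),
           c + (if (PySem.Str.pyGet? seq (hd + relativecoord)).getD '?' = 'c' then 1 else 0),
           g + (if (PySem.Str.pyGet? seq (hd + relativecoord)).getD '?' = 'g' then 1 else 0),
           t + (if (PySem.Str.pyGet? seq (hd + relativecoord)).getD '?' = 't' then 1 else 0))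
        from rfl, ih]
    simp only [List.map_cons, List.count_cons, Prod.mk.injEq]
    generalize (PySem.Str.pyGet? seq (hd + relativecoord)).getD '?' = b
    refine ⟨?_, ?_, ?_, ?_⟩
    · rcases eq_or_ne b 'a' with h | h <;> simp [h] <;> omega
    · rcases eq_or_ne b 'c' with h | h <;> simp [h] <;> omega
    · rcases eq_or_ne b 'g' with h | h <;> simp [h] <;> omega
    · rcases eq_or_ne b 't' with h | h <;> simp [h] <;> omega

theorem pwmextract_spec : Claim_equal_pwmextract := by
  intro relativecoord seq tlcoord _ _
  show pwmextract relativecoord seq tlcoord = pwmextract_alt relativecoord seq tlcoord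
  unfold pwmextract pwmextract_alt
  rw [pwm_lambda_eq, pwm_fold_count]
  simp [PySem.List.count_eq]
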